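-- pv_equiv track=rewrite | github.com/lkoc/tesis_MIA_lk | validate_all.py | _parse_folder_args
-- ===== SOURCE A (Python) =====
-- _KNOWN_PROFILES = {"quick", "research"}
--
-- def _parse_folder_args(raw: list[str], default: str) -> list[tuple[str, str]]:
--     """Parse interleaved ``FOLDER [PROFILE] FOLDER [PROFILE]...`` positional args.
--
--     A token that matches a known profile name immediately after a folder token
--     is consumed as that folder's profile.  Any other profile token is attached
--     to the most recent folder.  Folders without an explicit profile token use
--     *default*.
--
--     Examples::
--
--         ["kim_2024_154kv_bedding", "research"]         -> [("kim…", "research")]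
--         ["aras", "kim_2024_154kv_bedding", "research"] -> [("aras", "quick"), ("kim…", "research")]
--         ["kim_2024_154kv_bedding/run_multilayer.py", "research"] -> [("kim…/run…", "research")]
--
--     Returns:
--         List of ``(folder_or_pinned_script, profile)`` pairs.
--     """
--     result: list[tuple[str, str]] = []
--     i = 0
--     while i < len(raw):
--         token = raw[i]
--         if token in _KNOWN_PROFILES:
--             # Stray profile token — attach to the previous entry
--             if result:
--                 folder, _ = result[-1]
--                 result[-1] = (folder, token)
--         else:
--             # folder (or folder/script.py) — peek for a following profile token
--             if i + 1 < len(raw) and raw[i + 1] in _KNOWN_PROFILES: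
--                 result.append((token, raw[i + 1]))
--                 i += 1  # consume the profile token
--             else:
--                 result.append((token, default))
--         i += 1
--     return result
-- ===== SOURCE B (Python) =====
-- _KNOWN_PROFILES = {"quick", "research"}
--
-- def _parse_folder_args(raw, default):
--     result = []
--     for token in raw:
--         if token in _KNOWN_PROFILES:
--             if result:
--                 result[-1] = (result[-1][0], token)
--         else:
--             result.append((token, default))
--     return result
-- ===== Notes on version B (the rewrite author's own statement) =====
-- stated objective: simpler
-- what changed: Replaces A's index-based while loop with one-token look-ahead and manual index skipping by a plain single-token fold that appends each folder with the default eagerly and lets any profile token overwrite the last entry's profile.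
import Mathlib
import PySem

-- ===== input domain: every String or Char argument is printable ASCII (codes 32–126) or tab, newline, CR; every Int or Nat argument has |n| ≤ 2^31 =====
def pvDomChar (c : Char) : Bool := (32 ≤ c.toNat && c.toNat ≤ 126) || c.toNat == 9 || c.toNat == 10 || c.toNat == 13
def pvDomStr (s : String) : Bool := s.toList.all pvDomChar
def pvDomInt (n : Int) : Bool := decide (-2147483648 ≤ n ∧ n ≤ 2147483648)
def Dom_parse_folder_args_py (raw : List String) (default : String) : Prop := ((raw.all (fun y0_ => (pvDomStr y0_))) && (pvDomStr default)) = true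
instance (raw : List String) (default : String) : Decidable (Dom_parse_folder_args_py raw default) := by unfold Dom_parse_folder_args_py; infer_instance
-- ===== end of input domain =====

-- B replaces A's index loop with one-token look-ahead by a plain fold that assigns the
-- default eagerly and lets any later profile token overwrite the last entry (simpler).

-- ===== PORT A =====
-- _KNOWN_PROFILES = {"quick", "research"}  (a 2-element set; membership test only)
def pvKnownProfiles : List String := ["quick", "research"]

-- result[-1] = (result[-1][0], token), a no-op on an empty result
def pvSetLastProfile (result : List (String × String)) (token : String) :
    List (String × String) :=
  match result.getLast? with
  | none => result
  | some (folder, _) => result.dropLast ++ [(folder, token)]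

-- the while-loop of A: state = (remaining tokens, result); the peek branch consumes two tokens
def parseLoopA (raw : List String) (default : String)
    (result : List (String × String)) : List (String × String) :=
  match raw with
  | [] => result
  | token :: rest =>
    if token ∈ pvKnownProfiles then
      parseLoopA rest default (pvSetLastProfile result token)
    else
      match rest with
      | next :: rest' =>
        if next ∈ pvKnownProfiles then
          parseLoopA rest' default (result ++ [(token, next)])
        else
          parseLoopA (next :: rest') default (result ++ [(token, default)])
      | [] => result ++ [(token, default)]
termination_by raw.length
decreasing_by all_goals (simp_all; try omega)

def parse_folder_args_py (raw : List String) (default : String) : List (String × String) :=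
  parseLoopA raw default []

-- ===== PORT B =====
-- one fold step of B's `for token in raw` loop
def pvStepB (default : String) (acc : List (String × String)) (token : String) :
    List (String × String) :=
  if token ∈ pvKnownProfiles then pvSetLastProfile acc token
  else acc ++ [(token, default)]

def parse_folder_args_py_alt (raw : List String) (default : String) : List (String × String) :=
  raw.foldl (pvStepB default) []

-- ===== PRECONDITION & SPEC =====
def Spec_parse_folder_args_py (raw : List String) (default : String) (out : List (String × String)) : Prop := out = parse_folder_args_py_alt raw default
instance (raw : List String) (default : String) (out : List (String × String)) : Decidable (Spec_parse_folder_args_py raw default out) := by unfold Spec_parse_folder_args_py; infer_instance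

-- ===== CLAIM (what is proved, stated in full; the proofs are below) =====
def Claim_equal_parse_folder_args_py : Prop := ∀ (raw : List String) (default : String), Dom_parse_folder_args_py raw default → Spec_parse_folder_args_py raw default (parse_folder_args_py raw default)

-- ===== LEMMAS AND PROOFS =====

-- overwriting the profile of the last entry, when the list visibly ends in one entry
theorem pvSetLastProfile_concat (xs : List (String × String)) (f p t : String) :
    pvSetLastProfile (xs ++ [(f, p)]) t = xs ++ [(f, t)] := by
  simp [pvSetLastProfile]

-- the loop of A computes B's fold from any intermediate state
theorem parseLoopA_eq_foldl (raw : List String) (default : String)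
    (result : List (String × String)) :
    parseLoopA raw default result = raw.foldl (pvStepB default) result := by
  fun_induction parseLoopA raw default result <;>
    simp_all [List.foldl_cons, pvStepB, pvSetLastProfile_concat]

-- ===== VERDICT (by name: the statement is the Claim_ definition above) =====
theorem parse_folder_args_py_spec : Claim_equal_parse_folder_args_py := by
  intro raw default _
  unfold Spec_parse_folder_args_py parse_folder_args_py parse_folder_args_py_alt
  exact parseLoopA_eq_foldl raw default []
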